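-- pv_equiv track=rewrite | github.com/Manitary/advent-of-code | 2015/python/08.py | realCount
-- ===== SOURCE A (Python) =====
-- def realCount(s):
--     count = 0
--     encoded = 6
--     i = 1
--     while i < len(s) - 1:
--         if s[i] == "\\":
--             if s[i + 1] == "\\" or s[i + 1] == '"':
--                 i += 2
--                 encoded += 4
--             elif s[i + 1] == "x":
--                 i += 4
--                 encoded += 5
--         else:
--             i += 1
--             encoded += 1
--         count += 1
--     return count, encoded
-- ===== SOURCE B (Python) =====
-- import re
--
-- # An escaped string literal: the interior s[1:-1] is a sequence of tokens, each
-- # an escape (\\, \", or \x followed by two characters) or a single character.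
-- _TOKEN = re.compile(r'\\\\|\\"|\\x..|.', re.DOTALL)
--
--
-- def realCount(s):
--     tokens = _TOKEN.findall(s[1:-1])
--     encoded = 6 + sum(5 if t.startswith('\\x') else 4 if len(t) == 2 else 1
--                       for t in tokens)
--     return len(tokens), encoded
-- ===== Notes on version B (the rewrite author's own statement) =====
-- stated objective: idiomatic
-- what changed: Replaces A's fused index-stepping while-loop (two accumulators updated per character step) with a regex tokenization of the interior s[1:-1] into escape tokens followed by len() and a per-token cost sum; Pre_ excludes strings on which A's loop never terminates (a backslash followed by a character other than backslash, quote or x at a scanned position) and malformed literals whose interior ends in a dangling escape, where A reads the closing delimiter and beyond as escape payload while B tokenizes only the interior - either reading of such a malformed literal is defensible.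
-- outside the precondition, e.g. on realCount('"a\\x"'): A returns (2, 12), B returns (3, 9); on realCount('"a\\"'): A returns (2, 11), B returns (2, 8)
import Mathlib
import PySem

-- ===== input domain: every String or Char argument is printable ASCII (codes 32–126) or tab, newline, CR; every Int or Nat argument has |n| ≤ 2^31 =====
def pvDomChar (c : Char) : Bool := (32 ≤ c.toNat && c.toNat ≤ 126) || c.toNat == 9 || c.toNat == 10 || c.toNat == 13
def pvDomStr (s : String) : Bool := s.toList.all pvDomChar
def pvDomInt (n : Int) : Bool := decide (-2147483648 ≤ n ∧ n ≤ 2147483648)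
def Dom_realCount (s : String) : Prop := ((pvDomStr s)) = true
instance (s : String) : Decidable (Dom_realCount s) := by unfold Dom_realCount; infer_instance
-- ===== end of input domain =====

-- B tokenizes the interior s[1:-1] with one regex pass and derives count/encoded from the
-- token list, instead of A's fused index-stepping while loop (objective: idiomatic).

-- ===== PORT A =====
-- A's while loop over indices 1..len(s)-2 with its two accumulators; the remaining
-- suffix of s.toList.drop 1 stands for position i (loop condition i < len(s)-1 ⇔ at
-- least 2 chars remain).  On a backslash followed by a char other than '\', '"', 'x'
-- the Python loop never advances i and diverges; those inputs are excluded by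
-- Pre_realCount, the port just stops there.
def goA : List Char → Int → Int → Int × Int
  | [], count, encoded => (count, encoded)
  | [_], count, encoded => (count, encoded)
  | a :: b :: rest, count, encoded =>
    if a = '\\' then
      if b = '\\' ∨ b = '"' then goA rest (count + 1) (encoded + 4)
      else if b = 'x' then
        -- i += 4: skip the two payload chars; if fewer remain the jump overshoots
        -- the scan and the loop exits with the updated accumulators
        match rest with
        | _ :: _ :: r => goA r (count + 1) (encoded + 5)
        | _ => (count + 1, encoded + 5)
      else (count, encoded)   -- Python diverges here; outside Pre_realCount
    else goA (b :: rest) (count + 1) (encoded + 1)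

def realCount (s : String) : Int × Int := goA (s.toList.drop 1) 0 6

-- ===== PORT B =====
-- hand port of Source B's re.findall(r'\\\\|\\"|\\x..|.', interior, re.DOTALL): at each
-- position the alternatives are tried in order; '.' matches any single character.
def tokB : List Char → List (List Char)
  | [] => []
  | [a] => [[a]]                                            -- '.' fallback
  | a :: b :: rest =>
    if a = '\\' then
      if b = '\\' ∨ b = '"' then [a, b] :: tokB rest          -- r'\\' / r'\\"'
      else if b = 'x' then
        match rest with
        | c :: d :: rest'' => [a, b, c, d] :: tokB rest''   -- r'\\x..'
        -- '.' matches the backslash; then (no escape can begin at 'x') '.' matches the 'x'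
        | short => [a] :: [b] :: tokB short
      else [a] :: tokB (b :: rest)                          -- '.' fallback
    else [a] :: tokB (b :: rest)                            -- '.'

-- per-token cost from Source B: '\x..' → 5, two-char escape → 4, plain char → 1
def tokCost (t : List Char) : Int :=
  if t.take 2 = ['\\', 'x'] then 5 else if t.length = 2 then 4 else 1

def realCount_alt (s : String) : Int × Int :=
  let tokens := tokB ((s.toList.drop 1).dropLast)
  (tokens.length, 6 + tokens.foldl (fun acc t => acc + tokCost t) 0)

-- ===== PRECONDITION & SPEC =====
-- Pre_ excludes two kinds of input: strings on which A's while loop never terminates (a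
-- backslash followed by a character other than '\\', '"', 'x' at a scanned position), and
-- malformed literals whose interior s[1:-1] ends in a dangling escape (a trailing
-- backslash, or an incomplete '\\x..'), a corner on which A's index jump reads the closing
-- delimiter and beyond as escape payload while B tokenizes only the interior — for such a
-- malformed literal either reading is defensible, so these inputs are left unclaimed.
-- escTerm: every scanned backslash starts one of the three escape forms (termination);
def escTerm : List Char → Bool
  | '\\' :: '\\' :: l => escTerm l
  | '\\' :: '"' :: l => escTerm l
  | '\\' :: 'x' :: _ :: _ :: l => escTerm l
  | '\\' :: 'x' :: _ => true
  | ['\\'] => true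
  | '\\' :: _ :: _ => false
  | _ :: l => escTerm l
  | [] => true

-- escPending: how far into an escape sequence the scan is when the list ends
-- (0 = at a token boundary, 1 = just after a backslash, 2/3 = inside a '\\x' payload)
def pendStep (st : Nat) (c : Char) : Nat :=
  if st = 1 then (if c = 'x' then 2 else 0)
  else if st = 2 then 3
  else if st = 3 then 0
  else if c = '\\' then 1 else 0

def escPending (v : List Char) : Nat := v.foldl pendStep 0

def Pre_realCount (s : String) : Prop :=
  escTerm (s.toList.drop 1) = true ∧ escPending ((s.toList.drop 1).dropLast) = 0
instance (s : String) : Decidable (Pre_realCount s) := by unfold Pre_realCount; infer_instance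

def pvWitness_realCount : String := "\"ab\\\\c\\x27\""

def Spec_realCount (s : String) (out : Int × Int) : Prop := out = realCount_alt s
instance (s : String) (out : Int × Int) : Decidable (Spec_realCount s out) := by unfold Spec_realCount; infer_instance

-- ===== CLAIM (what is proved, stated in full; the proofs are below) =====
def Claim_equal_realCount : Prop := ∀ (s : String), Dom_realCount s → Pre_realCount s → Spec_realCount s (realCount s)

-- ===== LEMMAS AND PROOFS =====

-- proof-side 4-state automaton (0 = token boundary, 1 = just after '\\', 2/3 = '\\x'
-- payload); escTerm and escPending above are characterized by it in the proofs below
def escStep (st : Nat) (c : Char) : Option Nat :=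
  if st = 0 then (if c = '\\' then some 1 else some 0)
  else if st = 1 then (if c = '\\' ∨ c = '"' then some 0 else if c = 'x' then some 2 else none)
  else if st = 2 then some 3
  else some 0

def escRun (l : List Char) : Option Nat :=
  l.foldl (fun st c => st.bind fun q => escStep q c) (some 0)

def costSum (ts : List (List Char)) : Int := ts.foldl (fun acc t => acc + tokCost t) 0

-- what A's scan of v ++ [last] produces, as a function of the automaton's end state on v
def expectedA (v : List Char) (last : Char) (c e : Int) : Int × Int :=
  if escRun v = some 1 then
    (c + (tokB v).length, e + costSum (tokB v) + (if last = 'x' then 4 else 3))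
  else if escRun v = some 2 then (c + (tokB v).length - 1, e + costSum (tokB v) + 3)
  else if escRun v = some 3 then (c + (tokB v).length - 2, e + costSum (tokB v) + 2)
  else (c + (tokB v).length, e + costSum (tokB v))

theorem escStep01 : escStep 0 '\\' = some 1 := by decide
theorem escStep1x : escStep 1 'x' = some 2 := by decide
theorem escStep2 (c : Char) : escStep 2 c = some 3 := by simp [escStep]
theorem escStep3 (c : Char) : escStep 3 c = some 0 := by simp [escStep]

theorem foldl_cost_add (ts : List (List Char)) (n : Int) :
    ts.foldl (fun acc t => acc + tokCost t) n = n + costSum ts := by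
  unfold costSum
  induction ts generalizing n with
  | nil => simp
  | cons t ts ih => simp only [List.foldl]; rw [ih (n + tokCost t), ih (0 + tokCost t)]; ring

theorem costSum_cons (t : List Char) (ts : List (List Char)) :
    costSum (t :: ts) = tokCost t + costSum ts := by
  unfold costSum
  rw [List.foldl_cons, foldl_cost_add ts (0 + tokCost t)]
  unfold costSum
  ring

theorem escRun_none (l : List Char) :
    List.foldl (fun st c => st.bind fun q => escStep q c) none l = none := by
  induction l with
  | nil => rfl
  | cons c l ih => simpa using ih

theorem expectedA_shift (v w : List Char) (last : Char) (k kc c e : Int)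
    (hrun : escRun w = escRun v)
    (hlen : ((tokB w).length : Int) = k + (tokB v).length)
    (hcost : costSum (tokB w) = kc + costSum (tokB v)) :
    expectedA w last c e = expectedA v last (c + k) (e + kc) := by
  unfold expectedA
  rw [hrun]
  split_ifs <;> simp only [Prod.mk.injEq] <;> constructor <;> omega

-- the core lemma: A's scan of v ++ [last] in terms of B's tokenization of v
theorem goA_expected (v : List Char) (last : Char) (c e : Int)
    (hu : (escRun (v ++ [last])).isSome = true) :
    goA (v ++ [last]) c e = expectedA v last c e := by
  fun_induction tokB v generalizing c e with
  | case1 =>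
    simp [goA, expectedA, escRun, tokB, costSum]
  | case2 a =>
    by_cases ha : a = '\\'
    · subst ha
      by_cases hl : last = '\\' ∨ last = '"'
      · have hlx : ¬ last = 'x' := by rcases hl with h | h <;> subst h <;> decide
        have hgo : goA (['\\'] ++ [last]) c e = (c + 1, e + 4) := by
          rcases hl with h | h <;> subst h <;> rfl
        rw [hgo]
        unfold expectedA
        rw [show escRun ['\\'] = some 1 from by decide]
        norm_num [show tokB ['\\'] = [['\\']] from rfl,
          show costSum [['\\']] = 1 from by decide, hlx, Prod.ext_iff]
        try omega
      · by_cases hx : last = 'x'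
        · subst hx
          rw [show goA (['\\'] ++ ['x']) c e = (c + 1, e + 5) from rfl]
          unfold expectedA
          rw [show escRun ['\\'] = some 1 from by decide]
          norm_num [show tokB ['\\'] = [['\\']] from rfl,
            show costSum [['\\']] = 1 from by decide, Prod.ext_iff]
          try omega
        · -- A diverges here: escRun is none, contradicting hu
          exfalso
          have hs : escStep 1 last = none := by simp [escStep, hl, hx]
          have hnone : escRun (['\\'] ++ [last]) = none := by
            simp [escRun, escStep01, hs]
          rw [hnone] at hu
          exact absurd hu (by simp)
    · have hgo : goA ([a] ++ [last]) c e = (c + 1, e + 1) := by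
        rw [show [a] ++ [last] = a :: [last] from rfl, goA.eq_def]
        simp [ha, goA]
      rw [hgo]
      unfold expectedA
      rw [show escRun [a] = some 0 from by simp [escRun, escStep, ha]]
      norm_num [show tokB [a] = [[a]] from rfl,
        show costSum [[a]] = 1 from by simp [costSum, tokCost], Prod.ext_iff]
      try omega
  | case3 b rest hb ih =>
    have hs2 : escStep 1 b = some 0 := by rcases hb with h | h <;> subst h <;> decide
    have hrun : escRun ('\\' :: b :: rest) = escRun rest := by
      simp [escRun, escStep01, hs2]
    have hrunu : escRun (('\\' :: b :: rest) ++ [last]) = escRun (rest ++ [last]) := by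
      simp [escRun, escStep01, hs2]
    rw [hrunu] at hu
    have hgo : goA (('\\' :: b :: rest) ++ [last]) c e = goA (rest ++ [last]) (c + 1) (e + 4) := by
      rw [show ('\\' :: b :: rest) ++ [last] = '\\' :: b :: (rest ++ [last]) from rfl, goA.eq_def]
      simp [hb]
    have htok : tokB ('\\' :: b :: rest) = ['\\', b] :: tokB rest := by
      rw [tokB.eq_def]
      simp [hb]
    have hcost : tokCost ['\\', b] = 4 := by rcases hb with h | h <;> subst h <;> decide
    rw [hgo, ih (c + 1) (e + 4) hu,
      expectedA_shift rest ('\\' :: b :: rest) last 1 4 c e hrun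
        (by rw [htok]; push_cast [List.length_cons]; omega)
        (by rw [htok, costSum_cons, hcost])]
  | case4 cc d rest'' hx ih =>
    have hrun : escRun ('\\' :: 'x' :: cc :: d :: rest'') = escRun rest'' := by
      simp [escRun, escStep01, escStep1x, escStep2, escStep3]
    have hrunu : escRun (('\\' :: 'x' :: cc :: d :: rest'') ++ [last]) = escRun (rest'' ++ [last]) := by
      simp [escRun, escStep01, escStep1x, escStep2, escStep3]
    rw [hrunu] at hu
    have hgo : goA (('\\' :: 'x' :: cc :: d :: rest'') ++ [last]) c e
        = goA (rest'' ++ [last]) (c + 1) (e + 5) := rfl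
    have htok : tokB ('\\' :: 'x' :: cc :: d :: rest'') = ['\\', 'x', cc, d] :: tokB rest'' := rfl
    have hcost : tokCost ['\\', 'x', cc, d] = 5 := by simp [tokCost]
    rw [hgo, ih (c + 1) (e + 5) hu,
      expectedA_shift rest'' ('\\' :: 'x' :: cc :: d :: rest'') last 1 5 c e hrun
        (by rw [htok]; push_cast [List.length_cons]; omega)
        (by rw [htok, costSum_cons, hcost])]
  | case5 rest hshort hx ih =>
    rcases rest with _ | ⟨p, rest'⟩
    · -- v = ['\\', 'x']: end state 2; A's jump consumes last and overshoots
      rw [show goA (['\\', 'x'] ++ [last]) c e = (c + 1, e + 5) from rfl]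
      unfold expectedA
      rw [show escRun ['\\', 'x'] = some 2 from by decide]
      norm_num [show tokB ['\\', 'x'] = [['\\'], ['x']] from rfl,
        show costSum [['\\'], ['x']] = 2 from by decide, Prod.ext_iff]
      try omega
    · rcases rest' with _ | ⟨q, r⟩
      · -- v = ['\\', 'x', p]: end state 3; A consumes p and last as payload
        rw [show (['\\', 'x', p] ++ [last]) = ['\\', 'x', p, last] from rfl,
          show goA ['\\', 'x', p, last] c e = (c + 1, e + 5) from rfl]
        unfold expectedA
        rw [show escRun ['\\', 'x', p] = some 3 from by
          simp [escRun, escStep01, escStep1x, escStep2]]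
        have hc : costSum [['\\'], ['x'], [p]] = 3 := by
          norm_num [costSum_cons, show tokCost ['\\'] = 1 from by decide,
            show tokCost ['x'] = 1 from by decide,
            show tokCost [p] = 1 from by simp [tokCost],
            show costSum ([] : List (List Char)) = 0 from rfl]
        norm_num [show tokB ['\\', 'x', p] = [['\\'], ['x'], [p]] from rfl, hc, Prod.ext_iff]
        try omega
      · exact absurd rfl (hshort p q r)
  | case6 b rest hb hx ih =>
    -- bad escape char: A diverges and escRun is none, contradicting hu
    exfalso
    have hs : escStep 1 b = none := by simp [escStep, hb, hx]
    have hnone : escRun (('\\' :: b :: rest) ++ [last]) = none := by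
      simp [escRun, escStep01, hs, escRun_none]
    rw [hnone] at hu
    exact absurd hu (by simp)
  | case7 a b rest ha ih =>
    have hrun : escRun (a :: b :: rest) = escRun (b :: rest) := by
      simp [escRun, escStep, ha]
    have hrunu : escRun ((a :: b :: rest) ++ [last]) = escRun ((b :: rest) ++ [last]) := by
      simp [escRun, escStep, ha]
    rw [hrunu] at hu
    have hgo : goA ((a :: b :: rest) ++ [last]) c e
        = goA ((b :: rest) ++ [last]) (c + 1) (e + 1) := by
      rw [show (a :: b :: rest) ++ [last] = a :: b :: (rest ++ [last]) from rfl, goA.eq_def]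
      simp [ha]
    have htok : tokB (a :: b :: rest) = [a] :: tokB (b :: rest) := by
      rw [tokB.eq_def]
      simp [ha]
    have hcost : tokCost [a] = 1 := by simp [tokCost]
    rw [hgo, ih (c + 1) (e + 1) hu,
      expectedA_shift (b :: rest) (a :: b :: rest) last 1 1 c e hrun
        (by rw [htok]; push_cast [List.length_cons]; omega)
        (by rw [htok, costSum_cons, hcost])]

theorem escRun_append_last (v : List Char) (last : Char)
    (hu : (escRun (v ++ [last])).isSome = true) : (escRun v).isSome = true := by
  unfold escRun at *
  rw [List.foldl_append] at hu
  cases h : List.foldl (fun st c => st.bind fun q => escStep q c) (some 0) v with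
  | none => rw [h, escRun_none] at hu; simp at hu
  | some q => simp

theorem escPending_eq (v : List Char) (st : Nat) (h : escRun v = some st) :
    escPending v = st := by
  suffices H : ∀ (v : List Char) (q st : Nat), q < 4 →
      List.foldl (fun st c => st.bind fun q => escStep q c) (some q) v = some st →
      List.foldl pendStep q v = st by
    exact H v 0 st (by omega) h
  intro v
  induction v with
  | nil => intro q st hq h; simpa using h
  | cons c v ih =>
    intro q st hq h
    simp only [List.foldl_cons, Option.bind_some] at h ⊢
    cases hs : escStep q c with
    | none => rw [hs, escRun_none] at h; cases h
    | some q' =>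
      rw [hs] at h
      have hq' : q' < 4 := by
        unfold escStep at hs
        split_ifs at hs <;> simp_all <;> omega
      have hp : pendStep q c = q' := by
        interval_cases q <;>
          (unfold escStep at hs; unfold pendStep; split_ifs at hs ⊢ <;> simp_all)
      rw [hp]
      exact ih q' st hq' h

theorem escTerm_isSome (l : List Char) : escTerm l = true → (escRun l).isSome = true := by
  fun_induction escTerm l with
  | case1 l ih => simp_all [escRun, escStep]
  | case2 l ih => simp_all [escRun, escStep]
  | case3 a b l ih => simp_all [escRun, escStep]
  | case4 tail h =>
    intro _
    rcases tail with _ | ⟨d, t⟩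
    · decide
    · rcases t with _ | ⟨e, t'⟩
      · simp [escRun, escStep]
      · exact (h d e t' rfl).elim
  | case5 => decide
  | case6 c tail h1 h2 h3 h4 => simp
  | case7 a l h1 h2 h3 h4 h5 h6 ih =>
    have ha : ¬ a = '\\' := by
      intro h
      rcases l with _ | ⟨c, t⟩
      · exact h5 h rfl
      · exact h6 c t h rfl
    simp_all [escRun, escStep]
  | case8 => decide

-- ===== VERDICT (by name: the statement is the Claim_ definition above) =====
theorem realCount_spec : Claim_equal_realCount := by
  intro s _ hpre
  obtain ⟨hterm, hz⟩ := hpre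
  show realCount s = realCount_alt s
  have hpre' : (escRun (s.toList.drop 1)).isSome = true := escTerm_isSome _ hterm
  unfold realCount realCount_alt
  by_cases hnil : s.toList.drop 1 = []
  · rw [hnil]
    simp [goA, tokB]
  · have hsplit : s.toList.drop 1
        = (s.toList.drop 1).dropLast ++ [(s.toList.drop 1).getLast hnil] :=
      (List.dropLast_append_getLast hnil).symm
    rw [hsplit] at hpre' ⊢
    have hvsome : (escRun ((s.toList.drop 1).dropLast)).isSome = true :=
      escRun_append_last _ _ hpre'
    cases hrv : escRun ((s.toList.drop 1).dropLast) with
    | none => rw [hrv] at hvsome; cases hvsome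
    | some st =>
      have h0 : st = 0 := by
        have hp := escPending_eq _ _ hrv
        omega
      subst h0
      rw [goA_expected _ _ _ _ hpre']
      unfold expectedA
      rw [hrv]
      norm_num [List.dropLast_concat, foldl_cost_add]
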